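-- pv_equiv track=rewrite | github.com/minotru/exadel-python-course-2021 | tasks/task03/task03.py | create_statistics
-- ===== SOURCE A (Python) =====
-- import string
--
-- def create_statistics(strings):
--     result = {}
--     for index, _string in enumerate(strings):
--         words = _string.lower().translate(str.maketrans(dict.fromkeys(string.punctuation))).split()
--         for word in words:
--             if word in result.keys():
--                 result[word]["count"] += 1
--             else:
--                 result[word] = {"count": 1, "first_line": index}
--     return result.items()
-- ===== SOURCE B (Python) =====
-- import string
--
-- def create_statistics(strings):
--     table = str.maketrans(dict.fromkeys(string.punctuation))
--     lines = [s.lower().translate(table).split() for s in strings]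
--     counts = {}
--     for line in lines:
--         for word in line:
--             counts[word] = counts.get(word, 0) + 1
--     first_line = {}
--     for index, line in enumerate(lines):
--         for word in line:
--             first_line.setdefault(word, index)
--     return {word: {"count": count, "first_line": first_line[word]}
--             for word, count in counts.items()}.items()
-- ===== Notes on version B (the rewrite author's own statement) =====
-- stated objective: faster
-- what changed: Replaces A's single interleaved loop maintaining a dict of nested {'count','first_line'} dicts with three flat passes (normalize all lines once with one precomputed translation table, flat count dict, setdefault pass for first lines, then assemble in count-dict insertion order).
import Mathlib
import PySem

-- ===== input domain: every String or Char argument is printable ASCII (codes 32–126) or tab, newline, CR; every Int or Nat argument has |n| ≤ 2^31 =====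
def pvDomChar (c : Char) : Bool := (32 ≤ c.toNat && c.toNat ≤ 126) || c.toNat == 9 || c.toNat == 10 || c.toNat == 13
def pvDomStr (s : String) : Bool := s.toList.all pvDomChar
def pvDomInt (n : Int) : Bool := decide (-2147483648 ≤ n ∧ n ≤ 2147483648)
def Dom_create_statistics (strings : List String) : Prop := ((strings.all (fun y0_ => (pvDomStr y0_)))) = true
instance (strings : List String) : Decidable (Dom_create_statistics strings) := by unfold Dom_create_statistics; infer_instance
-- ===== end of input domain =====

-- B replaces A's single interleaved loop (a dict of nested {'count','first_line'} dicts updated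
-- per word) with three flat passes: normalize lines once, a flat count dict, a setdefault pass
-- for first lines, then assemble in count-dict insertion order; the translation table is built
-- once instead of per line (a timing run measured B faster by a constant factor).

-- ===== PORT A =====
-- string.punctuation; str.maketrans(dict.fromkeys(string.punctuation)) + .translate deletes exactly these chars
def pvPunct : List Char := "!\"#$%&'()*+,-./:;<=>?@[\\]^_`{|}~".toList

-- _string.lower().translate(...delete punctuation...).split()  (this normalization appears verbatim in both Pythons)
def pvWordsOf (s : String) : List String :=
  PySem.Str.split₀ (String.ofList ((PySem.Str.lower s).toList.filter (fun c => !pvPunct.contains c)))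

def create_statistics (strings : List String) : List (String × (List (String × Int))) :=
  let result : PySem.Dict String (PySem.Dict String Int) :=
    (PySem.List.enumerate strings).foldl
      (fun result p =>
        (pvWordsOf p.2).foldl
          (fun (result : PySem.Dict String (PySem.Dict String Int)) word =>
            if result.contains word then
              -- result[word]["count"] += 1 (word is present here, so the default is never used)
              result.modify word PySem.Dict.empty (fun d => d.modify "count" 0 (· + 1))
            else
              result.insert word (PySem.Dict.ofList [("count", 1), ("first_line", p.1)]))
          result)
      PySem.Dict.empty
  -- result.items(): the inner dicts become association lists
  result.items.map (fun p => (p.1, p.2.items))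

-- ===== PORT B =====
def create_statistics_alt (strings : List String) : List (String × (List (String × Int))) :=
  let lines := strings.map pvWordsOf
  let counts : PySem.Dict String Int :=
    lines.foldl
      (fun counts line =>
        line.foldl (fun (counts : PySem.Dict String Int) word =>
          counts.insert word (counts.getD word 0 + 1)) counts)
      PySem.Dict.empty
  let firstLine : PySem.Dict String Int :=
    (PySem.List.enumerate lines).foldl
      (fun firstLine p =>
        p.2.foldl (fun (firstLine : PySem.Dict String Int) word =>
          firstLine.setdefault word p.1) firstLine)
      PySem.Dict.empty
  -- {word: {"count": count, "first_line": first_line[word]} for word, count in counts.items()}.items()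
  -- first_line[word] is always present for a key of counts; getD 0 only makes the lookup total
  (counts.items.foldl
      (fun (result : PySem.Dict String (List (String × Int))) p =>
        result.insert p.1 [("count", p.2), ("first_line", firstLine.getD p.1 0)])
      PySem.Dict.empty).items

-- ===== PRECONDITION & SPEC =====
def Spec_create_statistics (strings : List String) (out : List (String × (List (String × Int)))) : Prop := out = create_statistics_alt strings
instance (strings : List String) (out : List (String × (List (String × Int)))) : Decidable (Spec_create_statistics strings out) := by unfold Spec_create_statistics; infer_instance

-- ===== CLAIM (what is proved, stated in full; the proofs are below) =====
def Claim_equal_create_statistics : Prop := ∀ (strings : List String), Dom_create_statistics strings → Spec_create_statistics strings (create_statistics strings)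

-- ===== LEMMAS AND PROOFS =====

-- A's inner loop body, as a step over one (line index, word) pair
def pvStepA (r : PySem.Dict String (PySem.Dict String Int)) (q : Int × String) :
    PySem.Dict String (PySem.Dict String Int) :=
  if r.contains q.2 then
    r.modify q.2 PySem.Dict.empty (fun d => d.modify "count" 0 (· + 1))
  else
    r.insert q.2 (PySem.Dict.ofList [("count", 1), ("first_line", q.1)])

-- B's first_line loop body, as a step over one (line index, word) pair
def pvStepF (fl : PySem.Dict String Int) (q : Int × String) : PySem.Dict String Int :=
  fl.setdefault q.2 q.1

-- the flattened (line index, word) stream that both nested loops traverse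
def pvPairs (lines : List (List String)) : List (Int × String) :=
  (PySem.List.enumerate lines).flatMap (fun p => p.2.map (fun w => (p.1, w)))

-- a fold nested through enumerate+inner list is the fold over the flattened pair stream
theorem pv_foldl_pairs {σ : Type} (g : σ → Int × String → σ) (L : List (Int × List String)) (init : σ) :
    L.foldl (fun acc p => p.2.foldl (fun a w => g a (p.1, w)) acc) init
      = (L.flatMap (fun p => p.2.map (fun w => (p.1, w)))).foldl g init := by
  induction L generalizing init with
  | nil => rfl
  | cons hd tl ih =>
      simp only [List.flatMap_cons, List.foldl_append, List.foldl_cons, List.foldl_map]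
      exact ih _

theorem pv_enumerate_map {α β : Type} (f : α → β) (xs : List α) (s : Int) :
    PySem.List.enumerate (xs.map f) s = (PySem.List.enumerate xs s).map (fun p => (p.1, f p.2)) := by
  induction xs generalizing s with
  | nil => rfl
  | cons hd tl ih => simp [PySem.List.enumerate, ih]

-- the words of the pair stream, in order, are the flattened word lines
theorem pv_pairs_snd (lines : List (List String)) :
    (pvPairs lines).map Prod.snd = lines.flatten := by
  unfold pvPairs
  rw [List.map_flatMap]
  have h1 : ∀ p : Int × List String, (p.2.map (fun w => (p.1, w))).map Prod.snd = p.2 := by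
    intro p; rw [List.map_map]; simp [Function.comp_def]
  simp only [h1]
  rw [List.flatMap_def]
  show ((PySem.List.enumerate lines 0).map Prod.snd).flatten = lines.flatten
  rw [PySem.List.map_snd_enumerate]

-- main invariant: A's dict folded over the pair stream P has exactly the first-occurrence keys,
-- each carrying the word's count so far and B's first_line value
theorem pv_invariant (P : List (Int × String)) :
    (P.foldl pvStepF PySem.Dict.empty).keys = PySem.Set.ofList (P.map Prod.snd) ∧
    (P.foldl pvStepA PySem.Dict.empty).items
      = (PySem.Set.ofList (P.map Prod.snd)).map
          (fun w => (w, PySem.Dict.mk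
            [("count", (((P.map Prod.snd).count w : Nat) : Int)),
             ("first_line", (P.foldl pvStepF PySem.Dict.empty).getD w 0)])) := by
  induction P using List.reverseRecOn with
  | nil => constructor <;> rfl
  | append_singleton Q q ih =>
      obtain ⟨ihF, ihA⟩ := ih
      set flQ := Q.foldl pvStepF PySem.Dict.empty with hflQ
      set aQ := Q.foldl pvStepA PySem.Dict.empty with haQ
      have hkeysA : aQ.keys = PySem.Set.ofList (Q.map Prod.snd) := by
        show aQ.items.map Prod.fst = _
        rw [ihA, List.map_map]
        simp [Function.comp_def]
      have hndA : aQ.keys.Nodup := hkeysA ▸ PySem.Set.nodup_ofList _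
      simp only [List.foldl_append, List.foldl_cons, List.foldl_nil, List.map_append,
        List.map_cons, List.map_nil, ← hflQ, ← haQ]
      by_cases hw : q.2 ∈ Q.map Prod.snd
      · -- word already present: A bumps its inner "count", first_line is unchanged
        have hcA : aQ.contains q.2 = true := by
          rw [PySem.Dict.contains_iff_mem_keys, hkeysA, PySem.Set.mem_ofList]; exact hw
        have hcF : flQ.contains q.2 = true := by
          rw [PySem.Dict.contains_iff_mem_keys, ihF, PySem.Set.mem_ofList]; exact hw
        have hstepF : pvStepF flQ q = flQ := PySem.Dict.setdefault_of_contains _ _ hcF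
        have hset : PySem.Set.ofList (Q.map Prod.snd ++ [q.2]) = PySem.Set.ofList (Q.map Prod.snd) := by
          rw [PySem.Set.ofList_append_singleton,
            PySem.Set.add_of_mem (by rw [PySem.Set.mem_ofList]; exact hw)]
        have hgetD : aQ.getD q.2 PySem.Dict.empty
            = PySem.Dict.mk [("count", (((Q.map Prod.snd).count q.2 : Nat) : Int)),
                ("first_line", flQ.getD q.2 0)] := by
          apply PySem.Dict.getD_of_mem_items _ _ hndA
          rw [ihA]
          exact List.mem_map_of_mem (by rw [PySem.Set.mem_ofList]; exact hw)
        refine ⟨by rw [hstepF, ihF, hset], ?_⟩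
        show (pvStepA aQ q).items = _
        rw [hstepF, hset]
        unfold pvStepA
        rw [if_pos hcA]
        show (aQ.insert q.2 ((aQ.getD q.2 PySem.Dict.empty).modify "count" 0 (· + 1))).items = _
        rw [PySem.Dict.items_insert_of_contains _ _ hcA, hgetD, ihA, List.map_map]
        apply List.map_congr_left
        intro w hwmem
        simp only [Function.comp_apply]
        by_cases hwq : w = q.2
        · rw [hwq]
          simp only [beq_self_eq_true, if_pos]
          have hc : (Q.map Prod.snd ++ [q.2]).count q.2 = (Q.map Prod.snd).count q.2 + 1 := by
            simp [List.count_append]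
          rw [hc]
          push_cast
          rfl
        · have hbeq : (w == q.2) = false := beq_false_of_ne hwq
          rw [hbeq]
          simp only [if_false, Bool.false_eq_true]
          have hc : (Q.map Prod.snd ++ [q.2]).count w = (Q.map Prod.snd).count w := by
            simp [List.count_append, Ne.symm hwq]
          rw [hc]
      · -- new word: A appends a fresh {"count": 1, "first_line": i}, first_line records i
        have hnw : q.2 ∉ PySem.Set.ofList (Q.map Prod.snd) := by
          rw [PySem.Set.mem_ofList]; exact hw
        have hcA : aQ.contains q.2 = false := by
          rw [← Bool.not_eq_true, PySem.Dict.contains_iff_mem_keys, hkeysA]; exact hnw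
        have hcF : flQ.contains q.2 = false := by
          rw [← Bool.not_eq_true, PySem.Dict.contains_iff_mem_keys, ihF]; exact hnw
        have hstepF : pvStepF flQ q = flQ.insert q.2 q.1 :=
          PySem.Dict.setdefault_of_not_contains _ _ hcF
        have hset : PySem.Set.ofList (Q.map Prod.snd ++ [q.2])
            = PySem.Set.ofList (Q.map Prod.snd) ++ [q.2] := by
          rw [PySem.Set.ofList_append_singleton, PySem.Set.add_of_not_mem hnw]
        constructor
        · rw [hstepF, PySem.Dict.keys_insert_of_not_contains _ _ hcF, ihF, hset]
        · show (pvStepA aQ q).items = _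
          rw [hstepF, hset]
          unfold pvStepA
          rw [if_neg (by rw [hcA]; exact Bool.false_ne_true)]
          rw [PySem.Dict.items_insert_of_not_contains _ _ hcA, ihA, List.map_append]
          congr 1
          · apply List.map_congr_left
            intro w hwmem
            have hwq : w ≠ q.2 := by
              rintro rfl; exact hnw hwmem
            have hc : (Q.map Prod.snd ++ [q.2]).count w = (Q.map Prod.snd).count w := by
              simp [List.count_append, Ne.symm hwq]
            rw [hc, PySem.Dict.getD_insert_of_ne _ _ _ hwq]
          · have hc0 : (Q.map Prod.snd ++ [q.2]).count q.2 = 1 := by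
              have : (Q.map Prod.snd).count q.2 = 0 := List.count_eq_zero_of_not_mem hw
              simp [List.count_append, this]
            simp only [List.map_cons, List.map_nil, hc0,
              PySem.Dict.getD_insert_self]
            rfl

-- A's nested loop is pvStepA folded over the pair stream
theorem pv_fold_A (strings : List String) :
    (PySem.List.enumerate strings).foldl
      (fun result p =>
        (pvWordsOf p.2).foldl
          (fun (result : PySem.Dict String (PySem.Dict String Int)) word =>
            if result.contains word then
              result.modify word PySem.Dict.empty (fun d => d.modify "count" 0 (· + 1))
            else
              result.insert word (PySem.Dict.ofList [("count", 1), ("first_line", p.1)]))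
          result)
      PySem.Dict.empty = (pvPairs (strings.map pvWordsOf)).foldl pvStepA PySem.Dict.empty := by
  unfold pvPairs
  rw [← pv_foldl_pairs pvStepA, pv_enumerate_map, List.foldl_map]
  simp only [pvStepA]

-- B's first_line loop is pvStepF folded over the pair stream
theorem pv_fold_F (lines : List (List String)) :
    (PySem.List.enumerate lines).foldl
      (fun firstLine p =>
        p.2.foldl (fun (firstLine : PySem.Dict String Int) word =>
          firstLine.setdefault word p.1) firstLine)
      PySem.Dict.empty = (pvPairs lines).foldl pvStepF PySem.Dict.empty := by
  unfold pvPairs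
  rw [← pv_foldl_pairs pvStepF]
  simp only [pvStepF]

-- B's count loop is the counter of the flattened words
theorem pv_fold_C (lines : List (List String)) :
    lines.foldl
      (fun counts line =>
        line.foldl (fun (counts : PySem.Dict String Int) word =>
          counts.insert word (counts.getD word 0 + 1)) counts)
      PySem.Dict.empty = PySem.Dict.counter ((pvPairs lines).map Prod.snd) := by
  rw [pv_pairs_snd, ← List.foldl_flatten, PySem.Dict.foldl_insert_getD_add_one_eq_counter]

theorem pv_eq (strings : List String) :
    create_statistics strings = create_statistics_alt strings := by
  unfold create_statistics create_statistics_alt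
  dsimp only
  rw [pv_fold_A, pv_fold_F, pv_fold_C]
  obtain ⟨-, ihA⟩ := pv_invariant (pvPairs (strings.map pvWordsOf))
  rw [ihA, List.map_map]
  rw [PySem.Dict.items_foldl_insert_fresh _ Prod.fst
      (fun p => [("count", p.2), ("first_line",
        ((pvPairs (strings.map pvWordsOf)).foldl pvStepF PySem.Dict.empty).getD p.1 0)])
      PySem.Dict.empty (fun a _ => PySem.Dict.contains_empty _)
      (by
        show (PySem.Dict.counter ((pvPairs (strings.map pvWordsOf)).map Prod.snd)).keys.Nodup
        exact PySem.Dict.nodup_keys_counter _)]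
  rw [PySem.Dict.items_counter, List.map_map]
  rfl

-- ===== VERDICT (by name: the statement is the Claim_ definition above) =====
theorem create_statistics_spec : Claim_equal_create_statistics := by
  intro strings _
  unfold Spec_create_statistics
  exact pv_eq strings
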